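-- pv_equiv track=rewrite | github.com/ishan-gaur/mkdocs-liveedit | src/mkdocs_liveedit/sourcemap.py | count_frontmatter_offset
-- ===== SOURCE A (Python) =====
-- def count_frontmatter_offset(raw_file_content: str, page_markdown: str) -> int:
--     """Compute how many lines the frontmatter + separator occupy at the top of the file.
--
--     MkDocs strips frontmatter from page.markdown, so line numbers in the block map
--     need this offset added back to map to actual file lines.
--     """
--     raw_lines = raw_file_content.split("\n")
--
--     # If file starts with ---, find the closing ---
--     if raw_lines and raw_lines[0].strip() == "---":
--         for i in range(1, len(raw_lines)):
--             if raw_lines[i].strip() == "---":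
--                 # offset = frontmatter lines (0..i inclusive) + possibly a blank line after
--                 offset = i + 1
--                 # Skip blank lines between frontmatter end and content start
--                 while offset < len(raw_lines) and raw_lines[offset].strip() == "":
--                     offset += 1
--                 return offset
--     return 0
-- ===== SOURCE B (Python) =====
-- def count_frontmatter_offset(raw_file_content: str, page_markdown: str) -> int:
--     """Streaming rewrite: consume the raw text one line at a time with str.partition,
--     never building the full line list; count lines through the closing '---' and any
--     following blank lines."""
--     first, sep, rest = raw_file_content.partition("\n")
--     if first.strip() != "---":
--         return 0
--     if not sep:
--         return 0
--     # scan for the closing '---' line, one line per iteration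
--     n = 1
--     while True:
--         first, sep, rest = rest.partition("\n")
--         if first.strip() == "---":
--             tail = rest if sep else None
--             n += 1
--             break
--         if not sep:
--             return 0
--         n += 1
--     # skip whitespace-only lines after the closing delimiter
--     while tail is not None:
--         first, sep, rest = tail.partition("\n")
--         if first.strip() != "":
--             break
--         tail = rest if sep else None
--         n += 1
--     return n
-- ===== Notes on version B (the rewrite author's own statement) =====
-- stated objective: alternative
-- what changed: Instead of splitting the whole file into a line list and walking it with index-based for/while loops, B streams over the raw string, peeling one line at a time with str.partition and never materialising the line list.
import Mathlib
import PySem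

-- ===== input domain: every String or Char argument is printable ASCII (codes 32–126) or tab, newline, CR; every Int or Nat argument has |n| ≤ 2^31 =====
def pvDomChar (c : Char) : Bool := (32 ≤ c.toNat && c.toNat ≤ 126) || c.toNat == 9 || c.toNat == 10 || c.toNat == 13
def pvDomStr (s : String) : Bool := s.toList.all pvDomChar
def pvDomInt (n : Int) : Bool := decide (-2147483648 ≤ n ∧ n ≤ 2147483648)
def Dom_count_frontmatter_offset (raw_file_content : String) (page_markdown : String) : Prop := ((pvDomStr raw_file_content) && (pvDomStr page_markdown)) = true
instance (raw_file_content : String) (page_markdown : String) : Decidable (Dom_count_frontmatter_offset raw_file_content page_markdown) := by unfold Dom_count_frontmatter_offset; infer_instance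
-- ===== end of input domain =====

-- B replaces A's split-into-all-lines + index loops by a streaming scan that peels one line
-- at a time off the raw string (str.partition); objective: alternative (same result, different traversal).


-- ===== PORT A =====
-- A: split the whole file into lines, then an index `for` loop looking for the closing
-- '---', then an index `while` loop skipping blank lines.  Strings are handled as
-- List Char via PySem.Chars (exact on the ASCII domain).

-- `while offset < len(raw_lines) and raw_lines[offset].strip() == "": offset += 1`
def aSkip (lines : List (List Char)) (offset : Nat) : Nat :=
  if h : offset < lines.length then
    if PySem.Chars.strip lines[offset] == [] then aSkip lines (offset + 1) else offset
  else offset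
termination_by lines.length - offset

-- the `for i in range(1, len(raw_lines))` loop with its early return
def aFind (lines : List (List Char)) (i : Nat) : Int :=
  if h : i < lines.length then
    if PySem.Chars.strip lines[i] == ['-', '-', '-'] then ((aSkip lines (i + 1) : Nat) : Int)
    else aFind lines (i + 1)
  else 0
termination_by lines.length - i

def count_frontmatter_offset (raw_file_content : String) (page_markdown : String) : Int :=
  let raw_lines := PySem.Chars.splitOn raw_file_content.toList ['\n']
  match raw_lines with
  | [] => 0
  | l0 :: _ =>
    if PySem.Chars.strip l0 == ['-', '-', '-'] then aFind raw_lines 1 else 0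

-- ===== PORT B =====
-- B: never builds the line list; `s.partition("\n")` is takeWhile / dropWhile on the chars
-- (the `rest` of a partition with empty `sep` becomes `none`); the two while-loops are the
-- tail recursions bClose / bSkip.

-- second while loop: skip whitespace-only lines after the closing delimiter
def bSkip (tail : Option (List Char)) (n : Nat) : Nat :=
  match tail with
  | none => n
  | some s =>
    if PySem.Chars.strip (s.takeWhile (· != '\n')) == [] then
      bSkip (match s.dropWhile (· != '\n') with | [] => none | _ :: t => some t) (n + 1)
    else n
termination_by match tail with | none => 0 | some s => s.length + 1
decreasing_by
  have hle : (List.dropWhile (fun x => x != '\n') s).length ≤ s.length :=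
    List.length_dropWhile_le _ _
  cases hd : List.dropWhile (fun x => x != '\n') s with
  | nil => simp
  | cons c t => rw [hd] at hle; simp; simp at hle; omega

-- first while loop: scan for the closing '---' line, one line per iteration
def bClose (s : List Char) (n : Nat) : Int :=
  if PySem.Chars.strip (s.takeWhile (· != '\n')) == ['-', '-', '-'] then
    ((bSkip (match s.dropWhile (· != '\n') with | [] => none | _ :: t => some t) (n + 1) : Nat) : Int)
  else
    match hd : s.dropWhile (· != '\n') with
    | [] => 0
    | _ :: t => bClose t (n + 1)
termination_by s.length
decreasing_by
  have hle : (List.dropWhile (fun x => x != '\n') s).length ≤ s.length :=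
    List.length_dropWhile_le _ _
  rw [hd] at hle; simp at hle; omega

def count_frontmatter_offset_alt (raw_file_content : String) (page_markdown : String) : Int :=
  if PySem.Chars.strip (raw_file_content.toList.takeWhile (· != '\n')) != ['-', '-', '-'] then 0
  else
    match raw_file_content.toList.dropWhile (· != '\n') with
    | [] => 0
    | _ :: t => bClose t 1

-- ===== PRECONDITION & SPEC =====
def Spec_count_frontmatter_offset (raw_file_content : String) (page_markdown : String) (out : Int) : Prop := out = count_frontmatter_offset_alt raw_file_content page_markdown
instance (raw_file_content : String) (page_markdown : String) (out : Int) : Decidable (Spec_count_frontmatter_offset raw_file_content page_markdown out) := by unfold Spec_count_frontmatter_offset; infer_instance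

-- ===== CLAIM (what is proved, stated in full; the proofs are below) =====
def Claim_equal_count_frontmatter_offset : Prop := ∀ (raw_file_content : String) (page_markdown : String), Dom_count_frontmatter_offset raw_file_content page_markdown → Spec_count_frontmatter_offset raw_file_content page_markdown (count_frontmatter_offset raw_file_content page_markdown)

-- ===== LEMMAS AND PROOFS =====

-- number of leading whitespace-only lines
def skipCnt : List (List Char) → Nat
  | [] => 0
  | l :: ls => if PySem.Chars.strip l == [] then skipCnt ls + 1 else 0

-- both search loops in one relative form: scan the remaining lines for the closing '---',
-- `n` = absolute index of the head line
def findRel : List (List Char) → Nat → Int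
  | [], _ => 0
  | l :: ls, n =>
    if PySem.Chars.strip l == ['-', '-', '-'] then ((n + 1 + skipCnt ls : Nat) : Int)
    else findRel ls (n + 1)

-- the line list still to the right of B's cursor
def olines : Option (List Char) → List (List Char)
  | none => []
  | some cs => PySem.Chars.splitOn cs ['\n']

-- recurrence for single-character splitOn, proved on its fuelled worker
lemma go_spec (c : Char) (l : List Char) : ∀ (fuel : Nat) (cur : List Char) (acc : List (List Char)), l.length ≤ fuel →
    PySem.Chars.splitOn.go [c] fuel l cur acc =
      acc.reverse ++ (cur.reverse ++ l.takeWhile (· != c)) ::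
        (match l.dropWhile (· != c) with | [] => [] | _ :: t => PySem.Chars.splitOn t [c]) := by
  induction l with
  | nil =>
    intro fuel cur acc _
    cases fuel <;> simp [PySem.Chars.splitOn.go]
  | cons a rest ih =>
    intro fuel cur acc hf
    cases fuel with
    | zero => simp at hf
    | succ f =>
      by_cases hac : a = c
      · subst hac
        rw [PySem.Chars.splitOn.go]
        simp only [List.isPrefixOf, BEq.rfl, Bool.true_and, if_pos]
        simp only [List.length_cons, List.length_nil, List.drop_succ_cons, List.drop_zero]
        rw [ih f [] (cur.reverse :: acc) (by simpa using hf)]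
        simp [PySem.Chars.splitOn, ih (rest.length + 1) [] [] (by omega)]
      · rw [PySem.Chars.splitOn.go]
        have hpre : [c].isPrefixOf (a :: rest) = false := by
          simp [List.isPrefixOf]; exact fun h => (hac h.symm).elim
        rw [if_neg (by simp [hpre])]
        rw [ih f (a :: cur) acc (by simpa using hf)]
        simp [hac]

lemma splitOn_single (c : Char) (cs : List Char) :
    PySem.Chars.splitOn cs [c] =
      cs.takeWhile (· != c) ::
        (match cs.dropWhile (· != c) with | [] => [] | _ :: t => PySem.Chars.splitOn t [c]) := by
  simpa [PySem.Chars.splitOn] using go_spec c cs (cs.length + 1) [] [] (by omega)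

lemma aSkip_eq (lines : List (List Char)) (o : Nat) : aSkip lines o = o + skipCnt (lines.drop o) := by
  fun_induction aSkip lines o with
  | case1 o h hb ih =>
    rw [ih, ← List.getElem_cons_drop (as := lines) (h := h)]
    simp [skipCnt, hb]
    omega
  | case2 o h hb =>
    rw [← List.getElem_cons_drop (as := lines) (h := h)]
    simp [skipCnt, hb]
  | case3 o h =>
    rw [List.drop_eq_nil_of_le (by omega)]
    simp [skipCnt]

lemma aFind_eq (lines : List (List Char)) (i : Nat) : aFind lines i = findRel (lines.drop i) i := by
  fun_induction aFind lines i with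
  | case1 i h hm =>
    rw [← List.getElem_cons_drop (as := lines) (h := h)]
    simp only [findRel, hm, if_pos]
    rw [aSkip_eq]
  | case2 i h hm ih =>
    rw [← List.getElem_cons_drop (as := lines) (h := h)]
    simp only [findRel, hm]
    exact ih
  | case3 i h =>
    rw [List.drop_eq_nil_of_le (by omega)]
    simp [findRel]

lemma bSkip_eq (tail : Option (List Char)) (n : Nat) : bSkip tail n = n + skipCnt (olines tail) := by
  fun_induction bSkip tail n with
  | case1 n => simp [olines, skipCnt]
  | case2 n s hb ih =>
    rw [ih]
    simp only [olines, splitOn_single '\n' s]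
    simp only [skipCnt, hb, if_pos]
    cases hd : List.dropWhile (fun x => x != '\n') s with
    | nil => simp [skipCnt]
    | cons c t => simp; omega
  | case3 n s hb =>
    simp only [olines, splitOn_single '\n' s]
    simp [skipCnt, hb]

lemma bClose_eq (s : List Char) (n : Nat) :
    bClose s n = findRel (PySem.Chars.splitOn s ['\n']) n := by
  fun_induction bClose s n with
  | case1 s n hm =>
    rw [splitOn_single '\n' s]
    simp only [findRel, hm, if_pos, bSkip_eq]
    cases hd : List.dropWhile (fun x => x != '\n') s with
    | nil => simp [olines, skipCnt]
    | cons c t => simp [olines]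
  | case2 s n hm hd =>
    rw [splitOn_single '\n' s, hd]
    simp [findRel, hm]
  | case3 s n hm c t hd ih =>
    rw [splitOn_single '\n' s, hd]
    simp only [findRel, hm]
    exact ih

-- ===== VERDICT (by name: the statement is the Claim_ definition above) =====
theorem count_frontmatter_offset_spec : Claim_equal_count_frontmatter_offset := by
  intro raw pm _
  unfold Spec_count_frontmatter_offset count_frontmatter_offset count_frontmatter_offset_alt
  rw [splitOn_single '\n' raw.toList]
  by_cases hm : PySem.Chars.strip (raw.toList.takeWhile (· != '\n')) == ['-', '-', '-']
  · simp only [hm, if_pos, aFind_eq]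
    cases hd : List.dropWhile (fun x => x != '\n') raw.toList with
    | nil => simp [findRel]
    | cons c t =>
      simp [bClose_eq]
      intro h; exact absurd (by simpa using hm) h
  · have h : ¬ PySem.Chars.strip (raw.toList.takeWhile (· != '\n')) = ['-', '-', '-'] := by
      simpa using hm
    simp [h]
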